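-- pv_equiv track=rewrite | github.com/yastman/rag | scripts/e2e/langfuse_trace_validator.py | _resolve_missing_observations
-- ===== SOURCE A (Python) =====
-- OBSERVATION_ALIAS_GROUPS = {
--     "node-cache-check": {"node-cache-check", "cache-check"},
-- }
--
-- def _resolve_missing_observations(
--     required_observations: set[str], span_names: set[str]
-- ) -> set[str]:
--     """Return required observations not satisfied by any present span name.
--
--     Supports alias groups: if a required observation has aliases defined in
--     :data:`OBSERVATION_ALIAS_GROUPS`, any alias present in ``span_names``
--     satisfies the requirement for the canonical name.
--     """
--     missing: set[str] = set()
--     for req in required_observations: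
--         aliases = OBSERVATION_ALIAS_GROUPS.get(req, {req})
--         if not (aliases & span_names):
--             missing.add(req)
--     return missing
-- ===== SOURCE B (Python) =====
-- OBSERVATION_ALIAS_GROUPS = {
--     "node-cache-check": {"node-cache-check", "cache-check"},
-- }
--
-- # Reverse alias index built once, module-level work done inside the function to stay self-contained.
-- def _resolve_missing_observations(required_observations, span_names):
--     alias_index = {}
--     for canonical, aliases in OBSERVATION_ALIAS_GROUPS.items():
--         for alias in aliases:
--             alias_index[alias] = canonical
--     expanded = set(span_names)
--     for name in span_names:
--         canonical = alias_index.get(name)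
--         if canonical is not None:
--             expanded.add(canonical)
--     return required_observations - expanded
-- ===== Notes on version B (the rewrite author's own statement) =====
-- stated objective: alternative
-- what changed: Instead of intersecting each requirement's alias set with span_names, B builds a reverse alias->canonical index, expands the present-span set with the canonical names of present aliases in one pass over span_names, and returns a single set difference required - expanded.
import Mathlib
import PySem

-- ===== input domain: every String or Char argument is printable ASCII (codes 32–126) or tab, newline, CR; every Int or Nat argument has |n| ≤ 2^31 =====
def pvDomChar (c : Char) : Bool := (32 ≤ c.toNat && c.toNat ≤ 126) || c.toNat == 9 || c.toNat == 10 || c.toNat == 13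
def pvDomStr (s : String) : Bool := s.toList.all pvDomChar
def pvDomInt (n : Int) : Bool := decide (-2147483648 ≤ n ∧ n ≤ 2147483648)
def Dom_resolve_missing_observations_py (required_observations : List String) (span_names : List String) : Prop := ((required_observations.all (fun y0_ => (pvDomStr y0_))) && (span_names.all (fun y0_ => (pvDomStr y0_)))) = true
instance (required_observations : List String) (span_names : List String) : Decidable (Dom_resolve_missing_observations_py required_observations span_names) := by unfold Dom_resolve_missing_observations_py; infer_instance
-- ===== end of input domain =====

-- B replaces per-requirement alias-set intersections by a reverse alias index plus one set
-- difference against an expanded present-set (alternative decomposition; return value only).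

-- ===== PORT A =====
def OBSERVATION_ALIAS_GROUPS : PySem.Dict String (PySem.Set String) :=
  PySem.Dict.ofList [("node-cache-check", PySem.Set.ofList ["node-cache-check", "cache-check"])]

-- loop body of A's 'for req in required_observations'
def pyStepA (span_names : List String) (missing : PySem.Set String) (req : String) : PySem.Set String :=
  let aliases := OBSERVATION_ALIAS_GROUPS.getD req (PySem.Set.ofList [req])
  if PySem.Set.inter aliases span_names = [] then PySem.Set.add missing req else missing

def resolve_missing_observations_py (required_observations : List String) (span_names : List String) : List String :=
  required_observations.foldl (pyStepA span_names) PySem.Set.empty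

-- ===== PORT B =====
-- alias_index built from OBSERVATION_ALIAS_GROUPS (B's first double loop)
def pvAliasIndex : PySem.Dict String String :=
  OBSERVATION_ALIAS_GROUPS.items.foldl
    (fun idx p => p.2.foldl (fun idx a => idx.insert a p.1) idx) PySem.Dict.empty

-- loop body of B's 'for name in span_names'
def pyStepB (expanded : PySem.Set String) (name : String) : PySem.Set String :=
  match pvAliasIndex.get? name with
  | some c => PySem.Set.add expanded c
  | none => expanded

def resolve_missing_observations_py_alt (required_observations : List String) (span_names : List String) : List String :=
  let expanded := span_names.foldl pyStepB (PySem.Set.ofList span_names)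
  PySem.Set.diff (PySem.Set.ofList required_observations) expanded

-- ===== PRECONDITION & SPEC =====
def Spec_resolve_missing_observations_py (required_observations : List String) (span_names : List String) (out : List String) : Prop := out = resolve_missing_observations_py_alt required_observations span_names
instance (required_observations : List String) (span_names : List String) (out : List String) : Decidable (Spec_resolve_missing_observations_py required_observations span_names out) := by unfold Spec_resolve_missing_observations_py; infer_instance

-- ===== CLAIM (what is proved, stated in full; the proofs are below) =====
def Claim_equal_resolve_missing_observations_py : Prop := ∀ (required_observations : List String) (span_names : List String), Dom_resolve_missing_observations_py required_observations span_names → Spec_resolve_missing_observations_py required_observations span_names (resolve_missing_observations_py required_observations span_names)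

-- ===== LEMMAS AND PROOFS =====

theorem pvAliasIndex_get? (s : String) :
    pvAliasIndex.get? s =
      if s = "node-cache-check" ∨ s = "cache-check" then some "node-cache-check" else none := by
  have h : pvAliasIndex =
      PySem.Dict.mk [("node-cache-check", "node-cache-check"), ("cache-check", "node-cache-check")] := by
    decide
  rw [h]
  by_cases h1 : s = "node-cache-check"
  · subst h1
    rw [if_pos (Or.inl rfl)]
    decide
  · by_cases h2 : s = "cache-check"
    · subst h2
      rw [if_pos (Or.inr rfl)]
      decide
    · rw [if_neg (by tauto)]
      have b1 : ("node-cache-check" == s) = false := beq_eq_false_iff_ne.mpr (fun h' => h1 h'.symm)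
      have b2 : ("cache-check" == s) = false := beq_eq_false_iff_ne.mpr (fun h' => h2 h'.symm)
      simp [PySem.Dict.get?_mk_cons, b1, b2]
      rfl

theorem mem_foldl_stepB (l e : List String) (x : String) :
    x ∈ l.foldl pyStepB e ↔
      x ∈ e ∨ (x = "node-cache-check" ∧ ∃ s ∈ l, s = "node-cache-check" ∨ s = "cache-check") := by
  induction l generalizing e with
  | nil => simp
  | cons s l ih =>
    simp only [List.foldl_cons, ih, pyStepB, pvAliasIndex_get?]
    by_cases hs : s = "node-cache-check" ∨ s = "cache-check"
    · simp only [if_pos hs, PySem.Set.mem_add]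
      simp only [List.mem_cons]
      constructor
      · rintro (⟨h | h⟩ | ⟨hx, t, ht, hto⟩)
        · exact Or.inl h
        · exact Or.inr ⟨h, s, Or.inl rfl, hs⟩
        · exact Or.inr ⟨hx, t, Or.inr ht, hto⟩
      · rintro (h | ⟨hx, t, (rfl | ht), hto⟩)
        · exact Or.inl (Or.inl h)
        · exact Or.inl (Or.inr hx)
        · exact Or.inr ⟨hx, t, ht, hto⟩
    · simp only [if_neg hs]
      simp only [List.mem_cons]
      constructor
      · rintro (h | ⟨hx, t, ht, hto⟩)
        · exact Or.inl h
        · exact Or.inr ⟨hx, t, Or.inr ht, hto⟩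
      · rintro (h | ⟨hx, t, (rfl | ht), hto⟩)
        · exact Or.inl h
        · exact absurd hto hs
        · exact Or.inr ⟨hx, t, ht, hto⟩

theorem exists_alias_iff (spans : List String) :
    (∃ s ∈ spans, s = "node-cache-check" ∨ s = "cache-check") ↔
      ("node-cache-check" ∈ spans ∨ "cache-check" ∈ spans) := by
  constructor
  · rintro ⟨s, hs, rfl | rfl⟩
    · exact Or.inl hs
    · exact Or.inr hs
  · rintro (h | h)
    · exact ⟨_, h, Or.inl rfl⟩
    · exact ⟨_, h, Or.inr rfl⟩

theorem condA_iff (r : String) (spans : List String) :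
    (PySem.Set.inter (OBSERVATION_ALIAS_GROUPS.getD r (PySem.Set.ofList [r])) spans = []) ↔
      ¬ (r ∈ spans ∨ (r = "node-cache-check" ∧ ∃ s ∈ spans, s = "node-cache-check" ∨ s = "cache-check")) := by
  by_cases hr : r = "node-cache-check"
  · subst hr
    have hg : OBSERVATION_ALIAS_GROUPS.getD "node-cache-check" (PySem.Set.ofList ["node-cache-check"]) =
        ["node-cache-check", "cache-check"] := by decide
    rw [hg, exists_alias_iff]
    simp only [PySem.Set.inter, List.filter_eq_nil_iff]
    simp only [List.mem_cons, List.not_mem_nil, PySem.Set.contains_eq_listContains,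
      List.contains_iff_mem]
    simp only [forall_eq_or_imp]
    tauto
  · have hb : ("node-cache-check" == r) = false := beq_eq_false_iff_ne.mpr (fun h => hr h.symm)
    have hc : OBSERVATION_ALIAS_GROUPS.contains r = false := by
      have hm : OBSERVATION_ALIAS_GROUPS = PySem.Dict.mk
          [("node-cache-check", ["node-cache-check", "cache-check"])] := by decide
      rw [hm]
      simp [PySem.Dict.contains_mk, hb]
    rw [PySem.Dict.getD_of_not_contains _ _ hc]
    have ho : PySem.Set.ofList [r] = [r] := by
      exact PySem.Set.ofList_eq_self_of_nodup _ (List.nodup_singleton r)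
    rw [ho, exists_alias_iff]
    simp only [PySem.Set.inter, List.filter_eq_nil_iff]
    simp only [List.mem_cons, List.not_mem_nil, PySem.Set.contains_eq_listContains,
      List.contains_iff_mem, forall_eq, or_false]
    tauto

theorem diff_add_of_mem (s t : List String) (r : String) (hrt : r ∈ t) :
    PySem.Set.diff (PySem.Set.add s r) t = PySem.Set.diff s t := by
  by_cases hrs : r ∈ s
  · rw [PySem.Set.add_of_mem hrs]
  · rw [PySem.Set.add_of_not_mem hrs]
    simp only [PySem.Set.diff, List.filter_append]
    simp
    exact hrt

theorem diff_add_of_not_mem (s t : List String) (r : String) (hrt : r ∉ t) :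
    PySem.Set.diff (PySem.Set.add s r) t = PySem.Set.add (PySem.Set.diff s t) r := by
  by_cases hrs : r ∈ s
  · rw [PySem.Set.add_of_mem hrs, PySem.Set.add_of_mem ((PySem.Set.mem_diff s t r).mpr ⟨hrs, hrt⟩)]
  · rw [PySem.Set.add_of_not_mem hrs,
        PySem.Set.add_of_not_mem (fun h => hrs ((PySem.Set.mem_diff s t r).mp h).1)]
    simp only [PySem.Set.diff, List.filter_append]
    simp
    exact hrt

theorem foldA_eq_diff (spans : List String) (E : List String)
    (hE : ∀ r : String,
      (PySem.Set.inter (OBSERVATION_ALIAS_GROUPS.getD r (PySem.Set.ofList [r])) spans = []) ↔ r ∉ E)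
    (l m : List String) :
    l.foldl (pyStepA spans) (PySem.Set.diff m E) = PySem.Set.diff (l.foldl PySem.Set.add m) E := by
  induction l generalizing m with
  | nil => rfl
  | cons r l ih =>
    simp only [List.foldl_cons]
    by_cases hr : r ∈ E
    · rw [show pyStepA spans (PySem.Set.diff m E) r = PySem.Set.diff m E from by
        unfold pyStepA
        rw [if_neg (fun h => (hE r).mp h hr)],
        show PySem.Set.diff m E = PySem.Set.diff (PySem.Set.add m r) E from
          (diff_add_of_mem m E r hr).symm]
      exact ih (PySem.Set.add m r)
    · rw [show pyStepA spans (PySem.Set.diff m E) r = PySem.Set.add (PySem.Set.diff m E) r from by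
        unfold pyStepA
        rw [if_pos ((hE r).mpr hr)],
        ← diff_add_of_not_mem m E r hr]
      exact ih (PySem.Set.add m r)

-- ===== VERDICT (by name: the statement is the Claim_ definition above) =====
theorem resolve_missing_observations_py_spec : Claim_equal_resolve_missing_observations_py := by
  intro req spans _
  unfold Spec_resolve_missing_observations_py resolve_missing_observations_py
    resolve_missing_observations_py_alt
  have hE : ∀ r : String,
      (PySem.Set.inter (OBSERVATION_ALIAS_GROUPS.getD r (PySem.Set.ofList [r])) spans = []) ↔
        r ∉ spans.foldl pyStepB (PySem.Set.ofList spans) := by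
    intro r
    rw [condA_iff r spans, mem_foldl_stepB]
    rw [PySem.Set.mem_ofList]
  have h0 : (PySem.Set.empty : PySem.Set String) =
      PySem.Set.diff [] (spans.foldl pyStepB (PySem.Set.ofList spans)) := rfl
  rw [h0, foldA_eq_diff spans _ hE req []]
  rfl
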